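-- pv_equiv track=rewrite | github.com/RicardoPinto92/sagex3importexport | ficheiroscsv_multiligue.py | filtrar_substituir
-- ===== SOURCE A (Python) =====
-- def filtrar_substituir(linhas, modo, referencias_originais, referencias_novas):
--     cabecalho = None
--     descontos = []
--     resultados = []
--     substituicoes = 0
--
--     for row in linhas:
--         if row[0] == 'E':
--             if cabecalho and descontos:
--                 resultados.append(cabecalho)
--                 resultados.extend(descontos)
--             cabecalho = row
--             descontos = []
--
--         elif row[0] == 'L':
--             ref = row[2].strip()
--
--             if modo == "substituir" and ref in referencias_originais:
--                 index = referencias_originais.index(ref)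
--                 row[2] = referencias_novas[index] if index < len(referencias_novas) else ref
--                 descontos.append(row)
--                 substituicoes += 1
--
--             elif modo == "eliminar" and ref not in referencias_originais:
--                 descontos.append(row)
--             elif modo == "eliminar" and ref in referencias_originais:
--                 index = referencias_originais.index(ref)
--                 row[2] = referencias_novas[index] if index < len(referencias_novas) else ref
--                 descontos.append(row)
--                 substituicoes += 1
--
--     if cabecalho and descontos:
--         resultados.append(cabecalho)
--         resultados.extend(descontos)
--
--     return resultados, substituicoes
-- ===== SOURCE B (Python) =====
-- def filtrar_substituir(linhas, modo, referencias_originais, referencias_novas):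
--     # first-occurrence index of each reference (replaces repeated .index scans)
--     ref_idx = {}
--     for i, r in enumerate(referencias_originais):
--         if r not in ref_idx:
--             ref_idx[r] = i
--
--     # pass 1: partition rows into groups: (header-or-None, following rows)
--     grupos = []
--     for row in linhas:
--         if row[0] == 'E':
--             grupos.append((row, []))
--         elif grupos:
--             grupos[-1][1].append(row)
--         else:
--             grupos.append((None, [row]))
--
--     # pass 2: process each group's 'L' rows, emit header + kept discounts
--     resultados = []
--     substituicoes = 0
--     for header, rows in grupos:
--         kept = []
--         for row in rows:
--             if row[0] != 'L':
--                 continue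
--             ref = row[2].strip()
--             if ref in ref_idx:
--                 if modo in ("substituir", "eliminar"):
--                     i = ref_idx[ref]
--                     row[2] = referencias_novas[i] if i < len(referencias_novas) else ref
--                     kept.append(row)
--                     substituicoes += 1
--             elif modo == "eliminar":
--                 kept.append(row)
--         if header is not None and kept:
--             resultados.append(header)
--             resultados.extend(kept)
--     return resultados, substituicoes
-- ===== Notes on version B (the rewrite author's own statement) =====
-- stated objective: alternative
-- what changed: Replaces A's single-pass flush-on-next-header state machine with a two-pass design: first partition rows into header groups, then process each group's 'L' rows with a precomputed first-occurrence index dict (merging A's two identical replacement branches) and emit header plus kept rows per group.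
import Mathlib
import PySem

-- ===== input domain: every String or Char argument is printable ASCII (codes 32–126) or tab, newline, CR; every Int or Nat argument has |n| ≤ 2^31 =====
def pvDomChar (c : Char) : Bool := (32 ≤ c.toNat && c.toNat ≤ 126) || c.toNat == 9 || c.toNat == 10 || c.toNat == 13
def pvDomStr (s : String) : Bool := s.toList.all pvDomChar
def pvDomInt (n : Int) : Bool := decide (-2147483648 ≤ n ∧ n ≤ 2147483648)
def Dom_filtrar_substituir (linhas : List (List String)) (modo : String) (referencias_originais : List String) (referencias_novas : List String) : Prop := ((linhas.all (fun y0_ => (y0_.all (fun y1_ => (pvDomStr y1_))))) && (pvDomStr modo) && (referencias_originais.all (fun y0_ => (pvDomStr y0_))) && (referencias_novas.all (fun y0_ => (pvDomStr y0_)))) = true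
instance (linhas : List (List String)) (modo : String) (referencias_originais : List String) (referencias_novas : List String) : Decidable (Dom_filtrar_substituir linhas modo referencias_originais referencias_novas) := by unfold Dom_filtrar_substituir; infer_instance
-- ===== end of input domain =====

-- B replaces A's single-pass flush-on-next-header state machine by a two-pass grouping with a
-- first-index dict (objective: alternative decomposition). Both Pythons mutate row[2] of 'L' rows
-- in place; the equivalence proved here is about the RETURN value only.

-- ===== PORT A =====
-- state = (cabecalho, descontos, resultados, substituicoes); cabecalho None is modelled as []
-- (Python's truthiness test `if cabecalho` is non-None AND non-empty, which []" renders exactly).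
def pvStepA (modo : String) (ro rn : List String)
    (st : List String × List (List String) × List (List String) × Int)
    (row : List String) : List String × List (List String) × List (List String) × Int :=
  if (PySem.List.pyGet? row 0).getD "" = "E" then
    if st.1 ≠ [] ∧ st.2.1 ≠ [] then (row, ([], (st.2.2.1 ++ st.1 :: st.2.1, st.2.2.2)))
    else (row, ([], (st.2.2.1, st.2.2.2)))
  else if (PySem.List.pyGet? row 0).getD "" = "L" then
    let ref := PySem.Str.strip ((PySem.List.pyGet? row 2).getD "")
    if modo = "substituir" ∧ ref ∈ ro then
      let i : Nat := (PySem.List.index? ro ref).getD 0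
      let v := if (i : Int) < rn.length then (PySem.List.pyGet? rn (i : Int)).getD ref else ref
      (st.1, (st.2.1 ++ [row.set 2 v], (st.2.2.1, st.2.2.2 + 1)))
    else if modo = "eliminar" ∧ ref ∉ ro then
      (st.1, (st.2.1 ++ [row], (st.2.2.1, st.2.2.2)))
    else if modo = "eliminar" ∧ ref ∈ ro then
      let i : Nat := (PySem.List.index? ro ref).getD 0
      let v := if (i : Int) < rn.length then (PySem.List.pyGet? rn (i : Int)).getD ref else ref
      (st.1, (st.2.1 ++ [row.set 2 v], (st.2.2.1, st.2.2.2 + 1)))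
    else st
  else st

def filtrar_substituir (linhas : List (List String)) (modo : String) (referencias_originais : List String) (referencias_novas : List String) : List (List String) × Int :=
  let st := linhas.foldl (pvStepA modo referencias_originais referencias_novas) ([], ([], ([], 0)))
  (if st.1 ≠ [] ∧ st.2.1 ≠ [] then st.2.2.1 ++ st.1 :: st.2.1 else st.2.2.1, st.2.2.2)

-- ===== PORT B =====
-- first-occurrence index of each reference (Source B's ref_idx loop)
def pvRefIdx (ro : List String) : PySem.Dict String Int :=
  (PySem.List.enumerate ro).foldl
    (fun d p => if d.contains p.2 then d else d.insert p.2 p.1) PySem.Dict.empty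

-- Source B's grouping loop; groups are kept most-recent-first (Lean rendering of append-to-last),
-- reversed once at the end.
def pvGStep (acc : List (Option (List String) × List (List String))) (row : List String) :
    List (Option (List String) × List (List String)) :=
  if (PySem.List.pyGet? row 0).getD "" = "E" then (some row, []) :: acc
  else match acc with
    | [] => [(none, [row])]
    | g :: t => (g.1, g.2 ++ [row]) :: t

-- one row of Source B's inner loop: state = (kept, substituicoes)
def pvKeptStep (modo : String) (d : PySem.Dict String Int) (rn : List String)
    (st : List (List String) × Int) (row : List String) : List (List String) × Int :=
  if (PySem.List.pyGet? row 0).getD "" ≠ "L" then st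
  else
    let ref := PySem.Str.strip ((PySem.List.pyGet? row 2).getD "")
    match d.get? ref with
    | some i =>
        if modo = "substituir" ∨ modo = "eliminar" then
          let v := if i < (rn.length : Int) then (PySem.List.pyGet? rn i).getD ref else ref
          (st.1 ++ [row.set 2 v], st.2 + 1)
        else st
    | none => if modo = "eliminar" then (st.1 ++ [row], st.2) else st

-- one group of Source B's second loop: state = (resultados, substituicoes)
def pvStepB (modo : String) (d : PySem.Dict String Int) (rn : List String)
    (st : List (List String) × Int) (g : Option (List String) × List (List String)) :
    List (List String) × Int :=
  let k := g.2.foldl (pvKeptStep modo d rn) ([], st.2)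
  (if g.1 ≠ none ∧ k.1 ≠ [] then st.1 ++ (g.1.getD []) :: k.1 else st.1, k.2)

def filtrar_substituir_alt (linhas : List (List String)) (modo : String) (referencias_originais : List String) (referencias_novas : List String) : List (List String) × Int :=
  let d := pvRefIdx referencias_originais
  ((linhas.foldl pvGStep []).reverse).foldl (pvStepB modo d referencias_novas) ([], 0)

-- ===== PRECONDITION & SPEC =====
-- Pre_ excludes exactly the inputs where Python A raises IndexError: an empty row (row[0]),
-- or an 'L' row with fewer than 3 fields (row[2]).
def Pre_filtrar_substituir (linhas : List (List String)) (modo : String) (referencias_originais : List String) (referencias_novas : List String) : Prop :=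
  ∀ row ∈ linhas, row ≠ [] ∧ ((PySem.List.pyGet? row 0).getD "" = "L" → 3 ≤ row.length)
instance (linhas : List (List String)) (modo : String) (referencias_originais : List String) (referencias_novas : List String) : Decidable (Pre_filtrar_substituir linhas modo referencias_originais referencias_novas) := by unfold Pre_filtrar_substituir; infer_instance

def pvWitness_filtrar_substituir : List (List String) × String × List String × List String :=
  ([["E", "cab"], ["L", "x", "R1 "], ["L", "x", "Z"]], "eliminar", ["R1"], ["R2"])

def Spec_filtrar_substituir (linhas : List (List String)) (modo : String) (referencias_originais : List String) (referencias_novas : List String) (out : List (List String) × Int) : Prop := out = filtrar_substituir_alt linhas modo referencias_originais referencias_novas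
instance (linhas : List (List String)) (modo : String) (referencias_originais : List String) (referencias_novas : List String) (out : List (List String) × Int) : Decidable (Spec_filtrar_substituir linhas modo referencias_originais referencias_novas out) := by unfold Spec_filtrar_substituir; infer_instance

-- ===== CLAIM (what is proved, stated in full; the proofs are below) =====
def Claim_equal_filtrar_substituir : Prop := ∀ (linhas : List (List String)) (modo : String) (referencias_originais : List String) (referencias_novas : List String), Dom_filtrar_substituir linhas modo referencias_originais referencias_novas → Pre_filtrar_substituir linhas modo referencias_originais referencias_novas → Spec_filtrar_substituir linhas modo referencias_originais referencias_novas (filtrar_substituir linhas modo referencias_originais referencias_novas)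

-- ===== LEMMAS AND PROOFS =====

-- the dict of Source B stores exactly the first index, i.e. Python's list.index
theorem pvRefIdx_fold_get? (ref : String) (l : List String) :
    ∀ (s : Int) (d : PySem.Dict String Int),
    ((PySem.List.enumerate l s).foldl
        (fun d p => if d.contains p.2 then d else d.insert p.2 p.1) d).get? ref =
      ((d.get? ref).orElse
        (fun _ => (PySem.List.index? l ref).map (fun n => s + (n : Int)))) := by
  induction l with
  | nil =>
    intro s d
    cases hd : d.get? ref <;> simp [PySem.List.enumerate_nil, hd, PySem.List.index?_eq_idxOf?]
  | cons x xs ih =>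
    intro s d
    rw [PySem.List.enumerate_cons, List.foldl_cons]
    by_cases hx : x = ref
    · subst hx
      cases hdx : d.get? x with
      | some i =>
        have hc : d.contains x = true := by
          rw [PySem.Dict.contains_eq_isSome_get?, hdx]; rfl
        simp only [hc, if_true]
        rw [ih (s + 1) d]
        simp [hdx]
      | none =>
        have hc : d.contains x = false := by
          rw [PySem.Dict.contains_eq_isSome_get?, hdx]; rfl
        simp only [hc, Bool.false_eq_true, if_false]
        rw [ih (s + 1) (d.insert x s)]
        rw [PySem.List.index?_cons_self x xs]
        simp [PySem.Dict.get?_insert_self]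
    · have hgoal : ∀ d' : PySem.Dict String Int, d'.get? ref = d.get? ref →
          ((PySem.List.enumerate xs (s + 1)).foldl
              (fun d p => if d.contains p.2 then d else d.insert p.2 p.1) d').get? ref =
            ((d.get? ref).orElse
              (fun _ => (PySem.List.index? (x :: xs) ref).map (fun n => s + (n : Int)))) := by
        intro d' hd'
        rw [ih (s + 1) d', hd', PySem.List.index?_cons_of_ne xs hx]
        cases d.get? ref <;> cases PySem.List.index? xs ref <;> simp <;> push_cast <;> ring
      split_ifs with hc
      · exact hgoal d rfl
      · exact hgoal (d.insert x s) (PySem.Dict.get?_insert_of_ne d s (fun h => hx h.symm))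

theorem pvRefIdx_get? (ro : List String) (ref : String) :
    (pvRefIdx ro).get? ref = (PySem.List.index? ro ref).map (fun n => (n : Int)) := by
  unfold pvRefIdx
  rw [pvRefIdx_fold_get? ref ro 0 PySem.Dict.empty]
  cases PySem.List.index? ro ref <;> simp [PySem.Dict.get?_empty]

-- per-row agreement of A's L-branch with Source B's inner-loop body (non-'E' rows)
theorem pvStep_row (modo : String) (ro rn : List String)
    (st : List String × List (List String) × List (List String) × Int) (row : List String)
    (h : (PySem.List.pyGet? row 0).getD "" ≠ "E") :
    pvStepA modo ro rn st row =
      (st.1, ((pvKeptStep modo (pvRefIdx ro) rn (st.2.1, st.2.2.2) row).1,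
        (st.2.2.1, (pvKeptStep modo (pvRefIdx ro) rn (st.2.1, st.2.2.2) row).2))) := by
  unfold pvStepA pvKeptStep
  rw [if_neg h]
  by_cases hL : (PySem.List.pyGet? row 0).getD "" = "L"
  · simp only [hL, ne_eq, not_true_eq_false, if_false]
    rw [pvRefIdx_get?]
    cases hidx : PySem.List.index? ro (PySem.Str.strip ((PySem.List.pyGet? row 2).getD "")) with
    | none =>
      have hmem := (PySem.List.index?_eq_none_iff ro _).mp hidx
      by_cases he : modo = "eliminar" <;> simp [hmem, he]
    | some n =>
      have hmem : PySem.Str.strip ((PySem.List.pyGet? row 2).getD "") ∈ ro := by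
        rw [← PySem.List.index?_isSome_iff, hidx]; rfl
      by_cases hs : modo = "substituir" <;> by_cases he : modo = "eliminar" <;>
        simp_all
  · rw [if_neg hL, if_pos (by simp [hL])]

-- every stored header starts with "E" (hence is non-empty)
def pvHdrOk (acc : List (Option (List String) × List (List String))) : Prop :=
  ∀ g ∈ acc, ∀ r, g.1 = some r → (PySem.List.pyGet? r 0).getD "" = "E"

theorem pvHdrOk_gstep {acc : List (Option (List String) × List (List String))}
    (h : pvHdrOk acc) (row : List String) : pvHdrOk (pvGStep acc row) := by
  unfold pvGStep
  split
  · rename_i hE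
    intro g hg r hr
    rcases List.mem_cons.mp hg with he | hm
    · subst he; simp only [Option.some.injEq] at hr; subst hr; exact hE
    · exact h g hm r hr
  · cases acc with
    | nil =>
      intro g hg r hr
      simp only [List.mem_singleton] at hg; subst hg; simp at hr
    | cons g0 t =>
      intro g hg r hr
      rcases List.mem_cons.mp hg with he | hm
      · subst he; exact h g0 List.mem_cons_self r hr
      · exact h g (List.mem_cons_of_mem g0 hm) r hr

-- a stored header (head "E") is a non-empty list, so Python's truthiness test on it is `is not None`
theorem pvHdr_truthy {acc : List (Option (List String) × List (List String))}
    (hk : pvHdrOk acc) (g : Option (List String) × List (List String)) (hg : g ∈ acc) :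
    (g.1.getD [] ≠ []) ↔ g.1 ≠ none := by
  cases hgo : g.1 with
  | none => simp
  | some r =>
    have hE := hk g hg r hgo
    have hr : r ≠ [] := by
      intro h0; rw [h0] at hE
      simp [PySem.List.pyGet?] at hE
    simp [hr]

-- abstraction: A's loop state read off from Source B's (reversed) group list
def pvPhi (modo : String) (d : PySem.Dict String Int) (rn : List String)
    (acc : List (Option (List String) × List (List String))) :
    List String × List (List String) × List (List String) × Int :=
  match acc with
  | [] => ([], ([], ([], 0)))
  | g :: t =>
    let pr := (t.reverse).foldl (pvStepB modo d rn) ([], 0)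
    let k := g.2.foldl (pvKeptStep modo d rn) ([], pr.2)
    (g.1.getD [], (k.1, (pr.1, k.2)))

theorem pvPhi_step (modo : String) (ro rn : List String)
    (acc : List (Option (List String) × List (List String))) (hk : pvHdrOk acc)
    (row : List String) :
    pvStepA modo ro rn (pvPhi modo (pvRefIdx ro) rn acc) row =
      pvPhi modo (pvRefIdx ro) rn (pvGStep acc row) := by
  by_cases hE : (PySem.List.pyGet? row 0).getD "" = "E"
  · cases acc with
    | nil => simp [pvGStep, pvStepA, pvPhi, hE]
    | cons g t =>
      have hne := pvHdr_truthy hk g List.mem_cons_self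
      simp only [pvGStep, if_pos hE, pvPhi, pvStepA, List.reverse_cons, List.foldl_append,
        List.foldl_cons, List.foldl_nil, pvStepB]
      split_ifs with h1 h2 <;> simp_all
  · rw [pvStep_row modo ro rn _ row hE]
    cases acc with
    | nil =>
      simp only [pvGStep, if_neg hE]
      simp [pvPhi]
    | cons g t =>
      simp only [pvGStep, if_neg hE]
      simp [pvPhi, List.foldl_append]

theorem pvPhi_foldl (modo : String) (ro rn : List String) (linhas : List (List String)) :
    ∀ (acc : List (Option (List String) × List (List String))), pvHdrOk acc →
    linhas.foldl (pvStepA modo ro rn) (pvPhi modo (pvRefIdx ro) rn acc) =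
      pvPhi modo (pvRefIdx ro) rn (linhas.foldl pvGStep acc) := by
  induction linhas with
  | nil => intro acc _; rfl
  | cons row rest ih =>
    intro acc hk
    simp only [List.foldl_cons]
    rw [pvPhi_step modo ro rn acc hk row]
    exact ih _ (pvHdrOk_gstep hk row)

theorem pvHdrOk_foldl (linhas : List (List String))
    {acc : List (Option (List String) × List (List String))} (h : pvHdrOk acc) :
    pvHdrOk (linhas.foldl pvGStep acc) := by
  induction linhas generalizing acc with
  | nil => exact h
  | cons row rest ih => exact ih (pvHdrOk_gstep h row)

-- finalization of A's state = emitting the last group in B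
theorem pvFinal (modo : String) (d : PySem.Dict String Int) (rn : List String)
    (acc : List (Option (List String) × List (List String))) (hk : pvHdrOk acc) :
    (if (pvPhi modo d rn acc).1 ≠ [] ∧ (pvPhi modo d rn acc).2.1 ≠ [] then
        (pvPhi modo d rn acc).2.2.1 ++ (pvPhi modo d rn acc).1 :: (pvPhi modo d rn acc).2.1
      else (pvPhi modo d rn acc).2.2.1,
     (pvPhi modo d rn acc).2.2.2) =
      acc.reverse.foldl (pvStepB modo d rn) ([], 0) := by
  cases acc with
  | nil => simp [pvPhi]
  | cons g t =>
    have hne := pvHdr_truthy hk g List.mem_cons_self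
    simp only [pvPhi, List.reverse_cons, List.foldl_append, List.foldl_cons, List.foldl_nil,
      pvStepB]
    split_ifs with h1 h2 <;> simp_all

-- ===== VERDICT (by name: the statement is the Claim_ definition above) =====
theorem filtrar_substituir_spec : Claim_equal_filtrar_substituir := by
  intro linhas modo ro rn _ _
  unfold Spec_filtrar_substituir filtrar_substituir filtrar_substituir_alt
  have h0 : pvHdrOk [] := by intro g hg; cases hg
  have h1 := pvPhi_foldl modo ro rn linhas [] h0
  have h2 : pvPhi modo (pvRefIdx ro) rn [] = ([], ([], ([], 0))) := rfl
  rw [h2] at h1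
  show (let st := linhas.foldl (pvStepA modo ro rn) ([], ([], ([], 0)));
    (if st.1 ≠ [] ∧ st.2.1 ≠ [] then st.2.2.1 ++ st.1 :: st.2.1 else st.2.2.1, st.2.2.2)) =
    ((linhas.foldl pvGStep []).reverse).foldl (pvStepB modo (pvRefIdx ro) rn) ([], 0)
  simp only [h1]
  exact pvFinal modo (pvRefIdx ro) rn _ (pvHdrOk_foldl linhas h0)
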